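-- pv_equiv track=rewrite | github.com/itsSubashNagaraj/PythonAutomation | Automation/extraction.py | map_columns_to_tables
-- ===== SOURCE A (Python) =====
-- def map_columns_to_tables(columns, tables):
--     table_columns_map = {table: [] for table in tables}
--     for column in columns:
--         for table in tables:
--             if column.startswith(table + '.') or '.' + table + '.' in column:
--                 table_columns_map[table].append(column)
--                 break
--             elif column.startswith(table.split('.')[-1]):
--                 table_columns_map[table].append(column)
--                 break
--     return table_columns_map
-- ===== SOURCE B (Python) =====
-- def map_columns_to_tables(columns, tables):
--     table_columns_map = {table: [] for table in tables}
--     assigned = set()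
--     for table in tables:
--         suffix = table.split('.')[-1]
--         for i, column in enumerate(columns):
--             if i in assigned:
--                 continue
--             if (column.startswith(table + '.')
--                     or '.' + table + '.' in column
--                     or column.startswith(suffix)):
--                 table_columns_map[table].append(column)
--                 assigned.add(i)
--     return table_columns_map
-- ===== Notes on version B (the rewrite author's own statement) =====
-- stated objective: alternative
-- what changed: Inverted the loop nesting: A iterates columns and scans tables with break; B iterates tables as the outer loop and walks the columns maintaining a set of already-assigned column indices, so first-match-in-table-order and per-table column order are preserved without any inner break.
import Mathlib
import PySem

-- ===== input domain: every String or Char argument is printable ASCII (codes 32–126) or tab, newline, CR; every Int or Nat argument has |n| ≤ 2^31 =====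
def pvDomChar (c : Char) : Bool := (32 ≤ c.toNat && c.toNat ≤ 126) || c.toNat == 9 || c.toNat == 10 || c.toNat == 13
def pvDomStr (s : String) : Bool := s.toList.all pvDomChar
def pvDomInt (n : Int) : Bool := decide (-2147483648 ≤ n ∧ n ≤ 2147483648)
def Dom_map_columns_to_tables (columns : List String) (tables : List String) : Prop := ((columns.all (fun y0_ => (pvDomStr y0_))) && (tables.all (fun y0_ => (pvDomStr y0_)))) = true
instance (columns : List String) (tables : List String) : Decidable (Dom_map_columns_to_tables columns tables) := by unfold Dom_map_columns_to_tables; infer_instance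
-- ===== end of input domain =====

-- B inverts A's loop nesting: tables become the outer loop and a set of already-assigned
-- column indices replaces A's inner break; alternative decomposition, same results.


-- ===== PORT A =====
-- column.startswith(table + '.') or '.' + table + '.' in column
def pvCondA1 (column table : String) : Bool :=
  PySem.Str.startswith column (table ++ ".") || PySem.Str.isIn ("." ++ table ++ ".") column

-- column.startswith(table.split('.')[-1]); the separator "." is nonempty so split?
-- is some, and the split list is never empty so the [-1] index never raises (exact).
def pvCondA2 (column table : String) : Bool :=
  PySem.Str.startswith column
    ((PySem.List.pyGet? ((PySem.Str.split? table ".").getD []) (-1)).getD "")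

-- the inner 'for table in tables: … break' loop; table_columns_map[table].append(column)
-- is Dict.modify (the key is always present, coming from tables, so no KeyError).
def pvInnerA (column : String) : List String → PySem.Dict String (List String) → PySem.Dict String (List String)
  | [], d => d
  | t :: ts, d =>
    if pvCondA1 column t then d.modify t [] (fun l => l ++ [column])
    else if pvCondA2 column t then d.modify t [] (fun l => l ++ [column])
    else pvInnerA column ts d

def map_columns_to_tables (columns : List String) (tables : List String) : List (String × List String) :=
  -- table_columns_map = {table: [] for table in tables}
  let init : PySem.Dict String (List String) :=
    tables.foldl (fun d t => d.insert t ([] : List String)) PySem.Dict.empty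
  (columns.foldl (fun d c => pvInnerA c tables d) init).items

-- ===== PORT B =====
-- the condition of Source B's inner loop, with the per-table 'suffix' let inlined:
-- column.startswith(table+'.') or '.'+table+'.' in column or column.startswith(suffix)
def pvMatchesB (column table : String) : Bool :=
  PySem.Str.startswith column (table ++ ".")
    || PySem.Str.isIn ("." ++ table ++ ".") column
    || PySem.Str.startswith column
        ((PySem.List.pyGet? ((PySem.Str.split? table ".").getD []) (-1)).getD "")

-- body of Source B's inner 'for i, column in enumerate(columns)' loop: state = (dict, assigned)
def pvStepB (t : String) (st : PySem.Dict String (List String) × PySem.Set Int)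
    (p : Int × String) : PySem.Dict String (List String) × PySem.Set Int :=
  if PySem.Set.contains st.2 p.1 then st           -- if i in assigned: continue
  else if pvMatchesB p.2 t then
    (st.1.modify t [] (fun l => l ++ [p.2]), PySem.Set.add st.2 p.1)
  else st

def map_columns_to_tables_alt (columns : List String) (tables : List String) : List (String × List String) :=
  -- table_columns_map = {table: [] for table in tables}; assigned = set()
  let init : PySem.Dict String (List String) :=
    tables.foldl (fun d t => d.insert t ([] : List String)) PySem.Dict.empty
  -- for table in tables: for i, column in enumerate(columns): …
  (tables.foldl (fun st t => (PySem.List.enumerate columns 0).foldl (pvStepB t) st)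
    (init, (PySem.Set.empty : PySem.Set Int))).1.items

-- ===== PRECONDITION & SPEC =====
def Spec_map_columns_to_tables (columns : List String) (tables : List String) (out : List (String × List String)) : Prop := out = map_columns_to_tables_alt columns tables
instance (columns : List String) (tables : List String) (out : List (String × List String)) : Decidable (Spec_map_columns_to_tables columns tables out) := by unfold Spec_map_columns_to_tables; infer_instance

-- ===== CLAIM (what is proved, stated in full; the proofs are below) =====
def Claim_equal_map_columns_to_tables : Prop := ∀ (columns : List String) (tables : List String), Dom_map_columns_to_tables columns tables → Spec_map_columns_to_tables columns tables (map_columns_to_tables columns tables)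

-- ===== LEMMAS AND PROOFS =====

-- A's two branch conditions, or-ed, are exactly B's match condition
theorem pvMatches_eq (c t : String) : (pvCondA1 c t || pvCondA2 c t) = pvMatchesB c t := by
  simp [pvCondA1, pvCondA2, pvMatchesB, Bool.or_assoc]

-- A's inner loop is: modify at the first matching table (if any)
theorem pvInnerA_eq_find (c : String) (ts : List String) (d : PySem.Dict String (List String)) :
    pvInnerA c ts d =
      match ts.find? (fun t => pvMatchesB c t) with
      | none => d
      | some t => d.modify t [] (fun l => l ++ [c]) := by
  induction ts generalizing d with
  | nil => rfl
  | cons t ts ih =>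
    simp only [pvInnerA, List.find?_cons]
    rcases h1 : pvCondA1 c t with _ | _ <;> rcases h2 : pvCondA2 c t with _ | _ <;>
      have := pvMatches_eq c t <;> simp_all

-- A's column loop, rewritten as a modify-fold over the (table, column) pairs it performs
theorem pvColsFold_eq (tables : List String) (cs : List String) (d : PySem.Dict String (List String)) :
    cs.foldl (fun d c => pvInnerA c tables d) d =
      (cs.filterMap (fun c => (tables.find? (fun t => pvMatchesB c t)).map (fun t => (t, c)))).foldl
        (fun d p => d.modify p.1 [] (fun l => l ++ [p.2])) d := by
  induction cs generalizing d with
  | nil => rfl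
  | cons c cs ih =>
    simp only [List.foldl_cons, List.filterMap_cons]
    rw [pvInnerA_eq_find]
    cases h : tables.find? (fun t => pvMatchesB c t) <;> simp [ih]

-- A's performed pairs with first component k are exactly the columns whose first match is k
theorem pvPairs_filter (tables : List String) (cs : List String) (k : String) :
    ((cs.filterMap (fun c => (tables.find? (fun t => pvMatchesB c t)).map (fun t => (t, c)))).filter
        (fun p => p.1 == k)).map (·.2) =
      cs.filter (fun c => tables.find? (fun t' => pvMatchesB c t') == some k) := by
  induction cs with
  | nil => rfl
  | cons c cs ih =>
    simp only [List.filterMap_cons, List.filter_cons]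
    cases h : tables.find? (fun t => pvMatchesB c t) with
    | none => simpa [h] using ih
    | some t =>
      by_cases hk : t = k <;> simp [hk, ih]

-- the init dict maps every key to []
theorem pvInit_getD (ts : List String) (d : PySem.Dict String (List String)) (k : String)
    (h : d.getD k [] = []) :
    (ts.foldl (fun d t => d.insert t ([] : List String)) d).getD k [] = [] := by
  induction ts generalizing d with
  | nil => exact h
  | cons t ts ih =>
    simp only [List.foldl_cons]
    refine ih _ ?_
    rw [PySem.Dict.getD_insert]
    split <;> simp [h]

-- ---- B side ----

-- B's walk over tables, rewritten from the ghost viewpoint of the prefix 'ps' of tables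
-- already processed: the (table, column) append operations B still performs
def pvBPairs (columns : List String) : List String → List String → List (String × String)
  | _, [] => []
  | ps, t :: ts =>
      (columns.filter (fun c => (ps.find? (fun t' => pvMatchesB c t')).isNone && pvMatchesB c t)).map
          (fun c => (t, c))
        ++ pvBPairs columns (ps ++ [t]) ts

-- B's inner loop over the enumerated columns: with the assigned set agreeing with P on
-- every listed index, it performs exactly the appends of the not-yet-matched matching
-- columns (in column order) and adds exactly their indices
theorem pvInnerB_eq (t : String) (P : String → Bool) (L : List (Int × String))
    (d : PySem.Dict String (List String)) (S : PySem.Set Int)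
    (hinv : ∀ p ∈ L, PySem.Set.contains S p.1 = P p.2) (hnd : (L.map Prod.fst).Nodup) :
    L.foldl (pvStepB t) (d, S) =
      ((L.filter (fun p => !P p.2 && pvMatchesB p.2 t)).foldl
          (fun d p => d.modify t [] (fun l => l ++ [p.2])) d,
        S ++ (L.filter (fun p => !P p.2 && pvMatchesB p.2 t)).map Prod.fst) := by
  induction L generalizing d S with
  | nil => simp
  | cons p L ih =>
    have hndt : (L.map Prod.fst).Nodup := by simpa using hnd.of_cons
    have hp : PySem.Set.contains S p.1 = P p.2 := hinv p (List.mem_cons_self)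
    simp only [List.foldl_cons, List.filter_cons]
    cases hP : P p.2 with
    | true =>
      have hin : p.1 ∈ S := (PySem.Set.contains_iff S p.1).mp (by rw [hp, hP])
      have : pvStepB t (d, S) p = (d, S) := by
        simp [pvStepB, hin]
      rw [this, ih d S (fun q hq => hinv q (List.mem_cons_of_mem _ hq)) hndt]
      simp [hP]
    | false =>
      have hmem : p.1 ∉ S := fun hm => by
        rw [(PySem.Set.contains_iff S p.1).mpr hm] at hp
        simp [hP] at hp
      cases hM : pvMatchesB p.2 t with
      | false =>
        have : pvStepB t (d, S) p = (d, S) := by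
          simp [pvStepB, hmem, hM]
        rw [this, ih d S (fun q hq => hinv q (List.mem_cons_of_mem _ hq)) hndt]
        simp [hP, hM]
      | true =>
        have hstep : pvStepB t (d, S) p =
            (d.modify t [] (fun l => l ++ [p.2]), S ++ [p.1]) := by
          simp [pvStepB, hmem, hM, PySem.Set.add_of_not_mem hmem]
        have hfst : p.1 ∉ L.map Prod.fst := (List.nodup_cons.mp (by simpa using hnd)).1
        have hinv' : ∀ q ∈ L, PySem.Set.contains (S ++ [p.1]) q.1 = P q.2 := by
          intro q hq
          have hne : q.1 ≠ p.1 := fun he => hfst (he ▸ List.mem_map_of_mem hq)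
          have := hinv q (List.mem_cons_of_mem _ hq)
          simp_all [PySem.Set.contains_eq_listContains]
        rw [hstep, ih _ _ hinv' hndt]
        simp only [List.filter_cons, hP, hM, Bool.not_false, Bool.true_and, Bool.and_self,
          if_true, List.foldl_cons, List.map_cons, ← List.append_cons]

-- two pairs of the enumeration with the same index are the same pair, so membership of an
-- index in the filtered indices is the filter condition itself
theorem pvMemFstFilter (L : List (Int × String)) (hnd : (L.map Prod.fst).Nodup)
    (q : Int × String → Bool) (p : Int × String) (hp : p ∈ L) :
    p.1 ∈ (L.filter q).map Prod.fst ↔ q p = true := by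
  constructor
  · intro h
    obtain ⟨p', hp', he⟩ := List.mem_map.mp h
    obtain ⟨hp'L, hq'⟩ := List.mem_filter.mp hp'
    rwa [List.inj_on_of_nodup_map hnd hp hp'L he.symm]
  · intro h
    exact List.mem_map_of_mem (List.mem_filter.mpr ⟨hp, h⟩)

-- a fold over the filtered enumeration that only uses the column equals the fold
-- over the filtered columns themselves
theorem pvChunkFold (t : String) (q : String → Bool) (xs : List String) : ∀ (s : Int)
    (d : PySem.Dict String (List String)),
    ((PySem.List.enumerate xs s).filter (fun p => q p.2)).foldl
        (fun d p => d.modify t [] (fun l => l ++ [p.2])) d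
      = (xs.filter q).foldl (fun d c => d.modify t [] (fun l => l ++ [c])) d := by
  induction xs with
  | nil => intro s d; rfl
  | cons x xs ih =>
    intro s d
    rw [PySem.List.enumerate_cons]
    by_cases h : q x <;> simp [List.filter_cons, h, ih]

-- a fold of appends over pairs (t, c) only uses c
theorem pvMapFold (t : String) (cs : List String) (d : PySem.Dict String (List String)) :
    (cs.map (fun c => (t, c))).foldl (fun d p => d.modify p.1 [] (fun l => l ++ [p.2])) d
      = cs.foldl (fun d c => d.modify t [] (fun l => l ++ [c])) d := by
  simp [List.foldl_map]

-- B's outer loop equals the modify-fold over the remaining pvBPairs, given that the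
-- assigned set records exactly the columns matched by some table of the prefix ps
theorem pvOuterB_eq (columns : List String) (ts : List String) (ps : List String)
    (d : PySem.Dict String (List String)) (S : PySem.Set Int)
    (hinv : ∀ p ∈ PySem.List.enumerate columns 0,
      PySem.Set.contains S p.1 = (ps.find? (fun t' => pvMatchesB p.2 t')).isSome) :
    (ts.foldl (fun st t => (PySem.List.enumerate columns 0).foldl (pvStepB t) st) (d, S)).1
      = (pvBPairs columns ps ts).foldl (fun d p => d.modify p.1 [] (fun l => l ++ [p.2])) d := by
  induction ts generalizing ps d S with
  | nil => simp [pvBPairs]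
  | cons t ts ih =>
    have hnd : ((PySem.List.enumerate columns 0).map Prod.fst).Nodup := by
      rw [PySem.List.map_fst_enumerate]
      exact PySem.List.nodup_pyRange_one 0 (0 + columns.length)
    simp only [List.foldl_cons, pvBPairs]
    rw [pvInnerB_eq t (fun c => (ps.find? (fun t' => pvMatchesB c t')).isSome) _ d S hinv hnd,
      List.foldl_append]
    have hinv' : ∀ p ∈ PySem.List.enumerate columns 0,
        PySem.Set.contains
          (S ++ ((PySem.List.enumerate columns 0).filter
            (fun p => !(ps.find? (fun t' => pvMatchesB p.2 t')).isSome && pvMatchesB p.2 t)).map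
              Prod.fst) p.1
          = ((ps ++ [t]).find? (fun t' => pvMatchesB p.2 t')).isSome := by
      intro p hp
      have hSmem : p.1 ∈ S ↔ (ps.find? (fun t' => pvMatchesB p.2 t')).isSome = true := by
        rw [← PySem.Set.contains_iff, hinv p hp]
      have hFmem := pvMemFstFilter _ hnd
        (fun p => !(ps.find? (fun t' => pvMatchesB p.2 t')).isSome && pvMatchesB p.2 t) p hp
      rw [Bool.eq_iff_iff, PySem.Set.contains_iff, List.mem_append, List.find?_append]
      cases h1 : ps.find? (fun t' => pvMatchesB p.2 t') with
      | some v => exact iff_of_true (Or.inl (hSmem.mpr (by simp [h1]))) (by simp [h1])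
      | none =>
        cases h2 : pvMatchesB p.2 t with
        | true =>
          exact iff_of_true (Or.inr (hFmem.mpr (by simp [h1, h2])))
            (by simp [h1, h2, List.find?_cons])
        | false =>
          refine iff_of_false ?_ (by simp [h1, h2, List.find?_cons])
          rintro (h | h)
          · exact absurd (hSmem.mp h) (by simp [h1])
          · have := hFmem.mp h
            simp [h1, h2] at this
    rw [ih (ps ++ [t]) _ _ hinv']
    congr 1
    rw [pvChunkFold t
        (fun c => !(ps.find? (fun t' => pvMatchesB c t')).isSome && pvMatchesB c t) columns 0,
      pvMapFold t]
    have hpred : (fun c => (ps.find? (fun t' => pvMatchesB c t')).isNone && pvMatchesB c t)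
        = (fun c => !(ps.find? (fun t' => pvMatchesB c t')).isSome && pvMatchesB c t) := by
      funext c
      cases h : ps.find? (fun t' => pvMatchesB c t') <;> simp [h]
    rw [hpred]

-- every pair B performs names a table from the remaining list
theorem pvBPairs_fst_mem (columns : List String) (ts : List String) (ps : List String)
    (p : String × String) (hp : p ∈ pvBPairs columns ps ts) : p.1 ∈ ts := by
  induction ts generalizing ps with
  | nil => simp [pvBPairs] at hp
  | cons t ts ih =>
    simp only [pvBPairs, List.mem_append, List.mem_map] at hp
    rcases hp with ⟨c, _, rfl⟩ | h
    · exact List.mem_cons_self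
    · exact List.mem_cons_of_mem _ (ih (ps ++ [t]) h)

-- a table already seen in the prefix collects nothing further
theorem pvBPairs_filter_mem (columns : List String) (k : String) (ts : List String)
    (ps : List String) (hk : k ∈ ps) :
    ((pvBPairs columns ps ts).filter (fun p => p.1 == k)).map Prod.snd = [] := by
  induction ts generalizing ps with
  | nil => simp [pvBPairs]
  | cons t ts ih =>
    simp only [pvBPairs, List.filter_append, List.map_append]
    rw [ih (ps ++ [t]) (List.mem_append_left _ hk), List.append_nil]
    by_cases ht : t = k
    · subst ht
      have : columns.filter
          (fun c => (ps.find? (fun t' => pvMatchesB c t')).isNone && pvMatchesB c t) = [] := by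
        apply List.filter_eq_nil_iff.mpr
        intro c _
        cases hM : pvMatchesB c t with
        | false => simp [hM]
        | true =>
          have : (ps.find? (fun t' => pvMatchesB c t')).isSome := by
            rw [List.find?_isSome]; exact ⟨t, hk, hM⟩
          simp [Option.isNone_eq_false_iff.mpr this]
      simp [this]
    · have hfilter : ((columns.filter
            (fun c => (ps.find? (fun t' => pvMatchesB c t')).isNone && pvMatchesB c t)).map
          (fun c => (t, c))).filter (fun p => p.1 == k) = [] := by
        apply List.filter_eq_nil_iff.mpr
        intro p hp
        obtain ⟨c, _, rfl⟩ := List.mem_map.mp hp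
        simpa using ht
      simp [hfilter]

-- the columns B appends to a fresh table k are exactly those whose first match
-- in the remaining tables (after the unmatched prefix) is k
theorem pvBPairs_filter (columns : List String) (k : String) (ts : List String)
    (ps : List String) (hk : k ∉ ps) :
    ((pvBPairs columns ps ts).filter (fun p => p.1 == k)).map Prod.snd
      = columns.filter (fun c => (ps ++ ts).find? (fun t' => pvMatchesB c t') == some k) := by
  induction ts generalizing ps with
  | nil =>
    simp only [pvBPairs, List.filter_nil, List.map_nil, List.append_nil]
    symm
    apply List.filter_eq_nil_iff.mpr
    intro c _
    cases h : ps.find? (fun t' => pvMatchesB c t') with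
    | none => simp
    | some v =>
      have : v ≠ k := fun he => hk (he ▸ List.mem_of_find?_eq_some h)
      simp [this]
  | cons t ts ih =>
    simp only [pvBPairs, List.filter_append, List.map_append]
    by_cases ht : t = k
    · subst ht
      rw [pvBPairs_filter_mem columns t ts (ps ++ [t]) (List.mem_append_right _ List.mem_cons_self),
        List.append_nil]
      have hmap : ((columns.filter
            (fun c => (ps.find? (fun t' => pvMatchesB c t')).isNone && pvMatchesB c t)).map
          (fun c => (t, c))).filter (fun p => p.1 == t)
          = (columns.filter
            (fun c => (ps.find? (fun t' => pvMatchesB c t')).isNone && pvMatchesB c t)).map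
          (fun c => (t, c)) := by
        apply List.filter_eq_self.mpr
        intro p hp
        obtain ⟨c, _, rfl⟩ := List.mem_map.mp hp
        simp
      rw [hmap, List.map_map]
      simp only [Function.comp_def]
      rw [show (List.map (fun x => x)
            (List.filter (fun c =>
              (ps.find? (fun t' => pvMatchesB c t')).isNone && pvMatchesB c t) columns))
          = List.filter (fun c =>
              (ps.find? (fun t' => pvMatchesB c t')).isNone && pvMatchesB c t) columns
        from List.map_id' _]
      apply List.filter_congr
      intro c _
      rw [List.find?_append]
      cases h : ps.find? (fun t' => pvMatchesB c t') with
      | some v =>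
        have hvk : v ≠ t := fun he => hk (he ▸ List.mem_of_find?_eq_some h)
        simp [hvk]
      | none =>
        simp only [Option.isNone_none, Bool.true_and, Option.or]
        cases hM : pvMatchesB c t with
        | true => simp [List.find?_cons, hM]
        | false =>
          simp only [List.find?_cons, hM]
          cases h2 : ts.find? (fun t' => pvMatchesB c t') with
          | none => simp
          | some v =>
            have hpv : pvMatchesB c v = true := List.find?_some h2
            have hvk : v ≠ t := fun he => by rw [he, hM] at hpv; cases hpv
            simp [hvk]
    · have hfilter : ((columns.filter
            (fun c => (ps.find? (fun t' => pvMatchesB c t')).isNone && pvMatchesB c t)).map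
          (fun c => (t, c))).filter (fun p => p.1 == k) = [] := by
        apply List.filter_eq_nil_iff.mpr
        intro p hp
        obtain ⟨c, _, rfl⟩ := List.mem_map.mp hp
        simpa using ht
      rw [hfilter]
      simp only [List.map_nil, List.nil_append]
      rw [ih (ps ++ [t])
        (by simp only [List.mem_append, List.mem_singleton]
            rintro (h | h)
            · exact hk h
            · exact ht h.symm)]
      have : (ps ++ [t]) ++ ts = ps ++ t :: ts := by simp
      rw [this]

-- ===== VERDICT (by name: the statement is the Claim_ definition above) =====
theorem map_columns_to_tables_spec : Claim_equal_map_columns_to_tables := by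
  intro columns tables _
  unfold Spec_map_columns_to_tables
  simp only [map_columns_to_tables, map_columns_to_tables_alt]
  set init : PySem.Dict String (List String) :=
    tables.foldl (fun d t => d.insert t ([] : List String)) PySem.Dict.empty with hinit
  set dA := columns.foldl (fun d c => pvInnerA c tables d) init with hdA
  have hinv0 : ∀ p ∈ PySem.List.enumerate columns 0,
      PySem.Set.contains (PySem.Set.empty : PySem.Set Int) p.1
        = (([] : List String).find? (fun t' => pvMatchesB p.2 t')).isSome := by
    intro p _; rfl
  have hB := pvOuterB_eq columns tables [] init PySem.Set.empty hinv0
  rw [hB]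
  set pairsA := columns.filterMap
    (fun c => (tables.find? (fun t => pvMatchesB c t)).map (fun t => (t, c))) with hpa
  set pairsB := pvBPairs columns [] tables with hpb
  have hkeysA : dA.keys = PySem.Set.ofList tables := by
    rw [hdA, pvColsFold_eq,
      PySem.Dict.keys_foldl_modify_key _ (fun p : String × String => p.1) []
        (fun _ p l => l ++ [p.2]),
      hinit, PySem.Dict.keys_foldl_insert, PySem.Dict.keys_empty, PySem.Set.update_nil_left,
      PySem.Set.update_eq_append_filter]
    have : ∀ y ∈ (PySem.Set.ofList (pairsA.map (fun p => p.1)) : List String), y ∈ tables := by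
      intro y hy
      rw [PySem.Set.mem_ofList] at hy
      simp only [hpa, List.mem_map, List.mem_filterMap, Option.map_eq_some_iff] at hy
      obtain ⟨p, ⟨c, hc, t, ht, rfl⟩, rfl⟩ := hy
      exact List.mem_of_find?_eq_some ht
    rw [List.filter_eq_nil_iff.mpr
        (by intro y hy
            simp only [Bool.not_eq_eq_eq_not, Bool.not_true]
            simp [PySem.Set.mem_ofList, this y hy]),
      List.append_nil]
  have hkeysB : (pairsB.foldl (fun d p => d.modify p.1 [] (fun l => l ++ [p.2])) init).keys
      = PySem.Set.ofList tables := by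
    rw [PySem.Dict.keys_foldl_modify_key _ (fun p : String × String => p.1) []
        (fun _ p l => l ++ [p.2]),
      hinit, PySem.Dict.keys_foldl_insert, PySem.Dict.keys_empty, PySem.Set.update_nil_left,
      PySem.Set.update_eq_append_filter]
    have : ∀ y ∈ (PySem.Set.ofList (pairsB.map (fun p => p.1)) : List String), y ∈ tables := by
      intro y hy
      rw [PySem.Set.mem_ofList] at hy
      obtain ⟨p, hp, rfl⟩ := List.mem_map.mp hy
      exact pvBPairs_fst_mem columns tables [] p hp
    rw [List.filter_eq_nil_iff.mpr
        (by intro y hy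
            simp only [Bool.not_eq_eq_eq_not, Bool.not_true]
            simp [PySem.Set.mem_ofList, this y hy]),
      List.append_nil]
  have hndA : dA.keys.Nodup := hkeysA ▸ PySem.Set.nodup_ofList tables
  have hndB : (pairsB.foldl (fun d p => d.modify p.1 [] (fun l => l ++ [p.2])) init).keys.Nodup :=
    hkeysB ▸ PySem.Set.nodup_ofList tables
  have hgetD : ∀ k ∈ tables,
      dA.getD k [] = (pairsB.foldl (fun d p => d.modify p.1 [] (fun l => l ++ [p.2])) init).getD k [] := by
    intro k _
    rw [hdA, pvColsFold_eq, PySem.Dict.getD_foldl_modify_append,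
      PySem.Dict.getD_foldl_modify_append, pvInit_getD _ _ _ (by simp),
      ← hpa, pvPairs_filter, hpb, pvBPairs_filter columns k tables [] (by simp)]
    simp
  rw [PySem.Dict.items_eq_map_keys dA hndA [], PySem.Dict.items_eq_map_keys _ hndB [],
    hkeysA, hkeysB]
  exact List.map_congr_left (fun k hk => by
    rw [PySem.Set.mem_ofList] at hk
    rw [hgetD k hk])
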